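-- pv_equiv track=rewrite | github.com/Stereo-Alex/Project-Week-1-Build-Your-Own-Game | your-project/binary_ag.py | computer_guesses
-- ===== SOURCE A (Python) =====
-- def computer_guesses(num, low, high):
--     guesses = []
--     guess = None
--     while guess != num:
--         guess = (high - low) // 2 + low
--         guesses.append(guess)
--         if guess > num:
--             high = guess
--         elif guess < num:
--             low = guess + 1
--     return guesses
-- ===== SOURCE B (Python) =====
-- def computer_guesses(num, low, high):
--     guess = (high - low) // 2 + low
--     if guess < num:
--         return [guess] + computer_guesses(num, guess + 1, high)
--     if guess > num:
--         return [guess] + computer_guesses(num, low, guess)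
--     return [guess]
-- ===== Notes on version B (the rewrite author's own statement) =====
-- stated objective: alternative
-- what changed: Replaces the imperative while-loop that mutates low/high and appends to an accumulator list with a recursive divide-and-conquer function that returns [guess] concatenated with the recursive call on the narrowed interval.
-- outside the precondition, e.g. on computer_guesses(-6, -5, -6): A returns [-6], B returns [-6]; on computer_guesses(5, 0, 3): A does not finish within the time limit, B raises RecursionError
import Mathlib
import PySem

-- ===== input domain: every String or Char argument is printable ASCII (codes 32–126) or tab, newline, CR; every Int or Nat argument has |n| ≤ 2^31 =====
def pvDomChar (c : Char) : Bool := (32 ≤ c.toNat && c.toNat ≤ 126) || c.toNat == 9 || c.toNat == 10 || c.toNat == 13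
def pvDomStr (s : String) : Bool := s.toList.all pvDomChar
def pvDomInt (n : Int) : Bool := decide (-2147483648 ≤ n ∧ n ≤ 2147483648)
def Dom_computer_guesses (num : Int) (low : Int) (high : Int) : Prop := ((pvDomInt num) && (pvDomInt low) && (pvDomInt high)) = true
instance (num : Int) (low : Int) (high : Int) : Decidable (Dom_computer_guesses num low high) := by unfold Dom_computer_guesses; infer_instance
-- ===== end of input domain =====

-- B replaces A's mutating while-loop with a recursive divide-and-conquer producing the same guess sequence (objective: alternative decomposition).
-- ===== PORT A =====
-- A's while-loop, transliterated with fuel (the loop diverges outside Pre_; inside Pre_ the fuel is proved sufficient).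
def pvALoop : Nat → Int → Int → Int → Option Int → List Int → List Int
  | 0, _, _, _, _, guesses => guesses
  | fuel+1, num, low, high, guess, guesses =>
    if guess = some num then guesses
    else
      let g := PySem.Int.floordiv (high - low) 2 + low
      if g > num then pvALoop fuel num low g (some g) (guesses ++ [g])
      else if g < num then pvALoop fuel num (g+1) high (some g) (guesses ++ [g])
      else pvALoop fuel num low high (some g) (guesses ++ [g])

def computer_guesses (num : Int) (low : Int) (high : Int) : List Int :=
  pvALoop ((high - low).toNat + 2) num low high none []

-- ===== PORT B =====
-- B's recursion, transliterated with fuel (same divergence region as A; fuel proved sufficient inside Pre_).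
def pvBRec : Nat → Int → Int → Int → List Int
  | 0, _, _, _ => []
  | fuel+1, num, low, high =>
    let g := PySem.Int.floordiv (high - low) 2 + low
    if g < num then g :: pvBRec fuel num (g+1) high
    else if g > num then g :: pvBRec fuel num low g
    else [g]

def computer_guesses_alt (num : Int) (low : Int) (high : Int) : List Int :=
  pvBRec ((high - low).toNat + 1) num low high

-- ===== PRECONDITION & SPEC =====
-- A's loop diverges on most inputs with num outside [low, high]; Pre_ excludes all such inputs, including the
-- degenerate high < low corners where A's termination (and return value, which B matches) is accidental.
def Pre_computer_guesses (num : Int) (low : Int) (high : Int) : Prop := low ≤ num ∧ num ≤ high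
instance (num : Int) (low : Int) (high : Int) : Decidable (Pre_computer_guesses num low high) := by unfold Pre_computer_guesses; infer_instance
def pvWitness_computer_guesses : Int × Int × Int := (7, 0, 20)
def Spec_computer_guesses (num : Int) (low : Int) (high : Int) (out : List Int) : Prop := out = computer_guesses_alt num low high
instance (num : Int) (low : Int) (high : Int) (out : List Int) : Decidable (Spec_computer_guesses num low high out) := by unfold Spec_computer_guesses; infer_instance

-- ===== CLAIM (what is proved, stated in full; the proofs are below) =====
def Claim_equal_computer_guesses : Prop := ∀ (num : Int) (low : Int) (high : Int), Dom_computer_guesses num low high → Pre_computer_guesses num low high → Spec_computer_guesses num low high (computer_guesses num low high)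

-- ===== LEMMAS AND PROOFS =====
-- the guess test only matters at the head of an iteration: with a known-unequal guess it behaves like none
lemma pvALoop_some_ne (f : Nat) (num low high g : Int) (acc : List Int) (h : g ≠ num) :
    pvALoop f num low high (some g) acc = pvALoop f num low high none acc := by
  cases f with
  | zero => rfl
  | succ f => simp [pvALoop, h]

lemma pvKey : ∀ m num low high, (high - low).toNat = m → low ≤ num → num ≤ high →
    ∀ f1 f2 acc, m + 2 ≤ f1 → m + 1 ≤ f2 →
    pvALoop f1 num low high none acc = acc ++ pvBRec f2 num low high := by
  intro m
  induction m using Nat.strong_induction_on with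
  | _ m ih =>
    intro num low high hm hlo hhi f1 f2 acc hf1 hf2
    obtain ⟨f1, rfl⟩ : ∃ k, f1 = k + 1 := ⟨f1 - 1, by omega⟩
    obtain ⟨f2, rfl⟩ : ∃ k, f2 = k + 1 := ⟨f2 - 1, by omega⟩
    have hd : PySem.Int.floordiv (high - low) 2 = (high - low) / 2 :=
      PySem.Int.floordiv_eq_ediv_of_pos (by omega)
    set g := PySem.Int.floordiv (high - low) 2 + low with hg
    have hgval : g = (high - low) / 2 + low := by rw [hg, hd]
    simp only [pvALoop, pvBRec, reduceCtorEq, if_false, ← hg]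
    rcases lt_trichotomy g num with hlt | heq | hgt
    · -- g < num : low moves to g + 1
      have hd1 : 1 ≤ high - low := by
        by_contra h
        have : g = low := by omega
        omega
      have hmeas : (high - (g + 1)).toNat < m := by omega
      rw [if_neg (by omega), if_pos hlt, if_pos hlt,
        pvALoop_some_ne _ _ _ _ _ _ (by omega),
        ih _ hmeas num (g + 1) high rfl (by omega) hhi f1 f2 _ (by omega) (by omega)]
      simp
    · -- g = num : final iteration appends num and the next head-test stops the loop
      rw [if_neg (by omega), if_neg (by omega), if_neg (by omega), if_neg (by omega)]
      obtain ⟨f1, rfl⟩ : ∃ k, f1 = k + 1 := ⟨f1 - 1, by omega⟩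
      simp [pvALoop, heq]
    · -- g > num : high moves to g
      have hd1 : 1 ≤ high - low := by
        by_contra h
        have : g = low := by omega
        omega
      have hmeas : (g - low).toNat < m := by omega
      rw [if_pos hgt, if_neg (by omega), if_pos hgt,
        pvALoop_some_ne _ _ _ _ _ _ (by omega),
        ih _ hmeas num low g rfl hlo (le_of_lt hgt) f1 f2 _ (by omega) (by omega)]
      simp

-- ===== VERDICT (by name: the statement is the Claim_ definition above) =====
theorem computer_guesses_spec : Claim_equal_computer_guesses := by
  intro num low high _ hpre
  unfold Spec_computer_guesses computer_guesses computer_guesses_alt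
  exact (pvKey ((high - low).toNat) num low high rfl hpre.1 hpre.2 _ ((high - low).toNat + 1) [] (by omega) (by omega)).trans (by simp)
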